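-- pv_equiv track=rewrite | github.com/dnkelly97/aes128 | main.py | ip_to_matrix
-- ===== SOURCE A (Python) =====
-- def ip_to_matrix(ip):
--     a, b, c, d = [], [], [], []
--     i, j = 0, 2
--     a.append(ip[i:j])
--     i = i + 2
--     j = j + 2
--     b.append(ip[i:j])
--     i = i + 2
--     j = j + 2
--     c.append(ip[i:j])
--     i = i + 2
--     j = j + 2
--     d.append(ip[i:j])
--     for x in range(3):
--         i = i + 2
--         j = j + 2
--         a.append(ip[i:j])
--         i = i + 2
--         j = j + 2
--         b.append(ip[i:j])
--         i = i + 2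
--         j = j + 2
--         c.append(ip[i:j])
--         i = i + 2
--         j = j + 2
--         d.append(ip[i:j])
--     return [a, b, c, d]
-- ===== SOURCE B (Python) =====
-- def ip_to_matrix(ip):
--     chunks = [ip[k:k + 2] for k in range(0, 32, 2)]
--     return [chunks[r::4] for r in range(4)]
-- ===== Notes on version B (the rewrite author's own statement) =====
-- stated objective: simpler
-- what changed: Replaces A's hand-stepped i/j counters appending into four lists interleaved with one comprehension collecting the 16 two-char chunks and strided slicing chunks[r::4] to form the four rows.
import Mathlib
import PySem

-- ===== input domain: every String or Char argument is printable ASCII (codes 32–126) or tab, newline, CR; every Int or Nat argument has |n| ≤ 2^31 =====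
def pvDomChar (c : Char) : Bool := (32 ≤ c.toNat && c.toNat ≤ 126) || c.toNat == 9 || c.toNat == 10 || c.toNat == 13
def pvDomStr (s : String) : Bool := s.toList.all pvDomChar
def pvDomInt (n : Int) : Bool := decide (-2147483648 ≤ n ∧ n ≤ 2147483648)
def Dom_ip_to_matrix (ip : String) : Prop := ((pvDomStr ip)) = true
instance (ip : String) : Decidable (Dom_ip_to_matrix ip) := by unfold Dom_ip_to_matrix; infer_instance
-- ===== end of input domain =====

-- B builds the 16 chunks in one comprehension and regroups them by strided slicing; simpler than A's interleaved counter-stepping.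
-- ===== PORT A =====
def ip_to_matrix (ip : String) : List (List String) :=
  let a : List String := []
  let b : List String := []
  let c : List String := []
  let d : List String := []
  let i : Int := 0
  let j : Int := 2
  let a := a ++ [PySem.Str.slice ip (some i) (some j)]
  let i := i + 2
  let j := j + 2
  let b := b ++ [PySem.Str.slice ip (some i) (some j)]
  let i := i + 2
  let j := j + 2
  let c := c ++ [PySem.Str.slice ip (some i) (some j)]
  let i := i + 2
  let j := j + 2
  let d := d ++ [PySem.Str.slice ip (some i) (some j)]
  let st := (PySem.List.pyRange 0 3 1).foldl (fun (st : List String × List String × List String × List String × Int × Int) _ =>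
    let (a, b, c, d, i, j) := st
    let i := i + 2
    let j := j + 2
    let a := a ++ [PySem.Str.slice ip (some i) (some j)]
    let i := i + 2
    let j := j + 2
    let b := b ++ [PySem.Str.slice ip (some i) (some j)]
    let i := i + 2
    let j := j + 2
    let c := c ++ [PySem.Str.slice ip (some i) (some j)]
    let i := i + 2
    let j := j + 2
    let d := d ++ [PySem.Str.slice ip (some i) (some j)]
    (a, b, c, d, i, j)) (a, b, c, d, i, j)
  [st.1, st.2.1, st.2.2.1, st.2.2.2.1]

-- ===== PORT B =====
-- chunks[r::4]: slice? with step 4 always returns some (step ≠ 0); getD [] is exact here.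
def ip_to_matrix_alt (ip : String) : List (List String) :=
  let chunks := (PySem.List.pyRange 0 32 2).map (fun k => PySem.Str.slice ip (some k) (some (k + 2)))
  (PySem.List.pyRange 0 4 1).map (fun r => (PySem.List.slice? chunks (some r) none 4).getD [])

-- ===== PRECONDITION & SPEC =====
def Spec_ip_to_matrix (ip : String) (out : List (List String)) : Prop := out = ip_to_matrix_alt ip
instance (ip : String) (out : List (List String)) : Decidable (Spec_ip_to_matrix ip out) := by unfold Spec_ip_to_matrix; infer_instance

-- ===== CLAIM (what is proved, stated in full; the proofs are below) =====
def Claim_equal_ip_to_matrix : Prop := ∀ (ip : String), Dom_ip_to_matrix ip → Spec_ip_to_matrix ip (ip_to_matrix ip)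

-- ===== LEMMAS AND PROOFS =====

-- ===== VERDICT (by name: the statement is the Claim_ definition above) =====
theorem ip_to_matrix_spec : Claim_equal_ip_to_matrix := by
  intro ip _
  unfold Spec_ip_to_matrix ip_to_matrix ip_to_matrix_alt
  have h3 : PySem.List.pyRange 0 3 1 = [0, 1, 2] := by decide
  have h4 : PySem.List.pyRange 0 4 1 = [0, 1, 2, 3] := by decide
  have h32 : PySem.List.pyRange 0 32 2 = [0, 2, 4, 6, 8, 10, 12, 14, 16, 18, 20, 22, 24, 26, 28, 30] := by decide
  have hr : List.range 4 = [0, 1, 2, 3] := by decide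
  have hs0 : PySem.List.sliceIndices 16 (some 0) none 4 = (0, 16, 4) := by decide
  have hs1 : PySem.List.sliceIndices 16 (some 1) none 4 = (1, 16, 4) := by decide
  have hs2 : PySem.List.sliceIndices 16 (some 2) none 4 = (2, 16, 4) := by decide
  have hs3 : PySem.List.sliceIndices 16 (some 3) none 4 = (3, 16, 4) := by decide
  simp [h3, h4, h32, List.foldl, PySem.List.slice?, hs0, hs1, hs2, hs3, hr]
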